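-- pv_equiv track=rewrite | github.com/cszeteny/feladat | nasa.py | gyakori_valaszto
-- ===== SOURCE A (Python) =====
-- def gyakori_valaszto(honapok):
--     honapok_ertek = sorted(list(dict(honapok).values()), reverse=True)
--     leggyakoribbak = {}
--     for i in honapok:
--         for j in range(3):
--             if honapok[i] == honapok_ertek[j]:
--                 leggyakoribbak[i] = honapok_ertek[j]
--     return leggyakoribbak
-- ===== SOURCE B (Python) =====
-- def gyakori_valaszto(honapok):
--     # one-pass bounded selection: keep the three largest values seen so far
--     top = []  # at most three values, descending
--     for v in honapok.values():
--         i = 0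
--         while i < len(top) and top[i] >= v:
--             i += 1
--         top.insert(i, v)
--         if len(top) > 3:
--             top.pop()
--     if len(top) < 3:
--         return dict(honapok)
--     kuszob = top[2]
--     return {k: v for k, v in honapok.items() if v >= kuszob}
-- ===== Notes on version B (the rewrite author's own statement) =====
-- stated objective: alternative
-- what changed: A sorts all values and tests each key's value for equality against the three largest with an inner loop and dict lookups; B never sorts: one pass maintains a bounded list of the three largest values (insert-and-truncate), then filters items once against the third largest.
import Mathlib
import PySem

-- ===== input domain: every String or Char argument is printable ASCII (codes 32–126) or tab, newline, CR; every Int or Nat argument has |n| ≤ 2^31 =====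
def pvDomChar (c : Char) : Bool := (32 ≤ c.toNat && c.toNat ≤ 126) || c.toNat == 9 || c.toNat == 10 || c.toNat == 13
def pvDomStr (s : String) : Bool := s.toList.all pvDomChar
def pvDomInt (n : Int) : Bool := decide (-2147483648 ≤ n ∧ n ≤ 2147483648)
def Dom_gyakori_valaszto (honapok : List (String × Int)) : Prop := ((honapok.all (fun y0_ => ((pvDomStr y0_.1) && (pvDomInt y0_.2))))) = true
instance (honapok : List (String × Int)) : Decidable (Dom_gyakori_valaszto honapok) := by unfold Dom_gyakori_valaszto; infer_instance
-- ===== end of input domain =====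

-- B replaces A's sort-plus-top-3-equality-loop by a single pass keeping the three largest
-- values and one threshold filter (objective: alternative — no sort, no per-key dict lookups).


-- ===== PORT A =====
-- literal port: honapok is the dict (assoc list in insertion order, unique keys);
-- honapok_ertek = sorted(list(dict(honapok).values()), reverse=True); then for each key i,
-- for j in range(3): if honapok[i] == honapok_ertek[j]: leggyakoribbak[i] = honapok_ertek[j].
-- pyGet?/get? = none is exactly where Python raises IndexError/KeyError (excluded by Pre_).
def gyakori_valaszto (honapok : List (String × Int)) : List (String × Int) :=
  let honapok_ertek := PySem.List.sorted ((PySem.Dict.mk honapok).values) (fun v => v) true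
  let leggyakoribbak := honapok.foldl (fun (d : PySem.Dict String Int) i =>
    (PySem.List.pyRange 0 3 1).foldl (fun d' j =>
      match PySem.List.pyGet? honapok_ertek j, (PySem.Dict.mk honapok).get? i.1 with
      | some x, some v => if v == x then d'.insert i.1 x else d'
      | _, _ => d') d) PySem.Dict.empty
  leggyakoribbak.items

-- ===== PORT B =====
-- Source B's inner while+insert walks past the elements >= v and inserts v there: ported as
-- the structurally identical recursion pvInsTop (exact step for step).
def pvInsTop (v : Int) : List Int → List Int
  | [] => [v]
  | h :: t => if v ≤ h then h :: pvInsTop v t else v :: h :: t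

-- literal port of Source B: one pass over honapok.values() maintaining `top` (insert, then
-- pop the last element when the length exceeds 3 — dropLast); if fewer than 3 values,
-- return dict(honapok); else filter items by v >= top[2] (in range: length = 3 there).
def gyakori_valaszto_alt (honapok : List (String × Int)) : List (String × Int) :=
  let top := ((PySem.Dict.mk honapok).values).foldl
      (fun top v => let t := pvInsTop v top; if 3 < t.length then t.dropLast else t) []
  if top.length < 3 then (PySem.Dict.mk honapok).items
  else (PySem.Dict.mk honapok).items.filter (fun kv => decide (top.getD 2 0 ≤ kv.2))
  -- top[2] is read with List.getD 2 0: in the else branch 2 < top.length, so the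
  -- default is never used and this is exactly Python's top[2]

-- ===== PRECONDITION & SPEC =====
-- Pre_ excludes dicts of 1 or 2 distinct keys, on which A raises IndexError on
-- honapok_ertek[2], and association lists with duplicate keys, which cannot arise from the
-- function's dict argument (a Python dict collapses them before the call).
def Pre_gyakori_valaszto (honapok : List (String × Int)) : Prop :=
  (honapok.map Prod.fst).Nodup ∧ (honapok = [] ∨ 3 ≤ honapok.length)
instance (honapok : List (String × Int)) : Decidable (Pre_gyakori_valaszto honapok) := by unfold Pre_gyakori_valaszto; infer_instance

def pvWitness_gyakori_valaszto : (List (String × Int)) := [("jan", 5), ("feb", 2), ("mar", 7)]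

def Spec_gyakori_valaszto (honapok : List (String × Int)) (out : List (String × Int)) : Prop := out = gyakori_valaszto_alt honapok
instance (honapok : List (String × Int)) (out : List (String × Int)) : Decidable (Spec_gyakori_valaszto honapok out) := by unfold Spec_gyakori_valaszto; infer_instance

-- ===== CLAIM (what is proved, stated in full; the proofs are below) =====
def Claim_equal_gyakori_valaszto : Prop := ∀ (honapok : List (String × Int)), Dom_gyakori_valaszto honapok → Pre_gyakori_valaszto honapok → Spec_gyakori_valaszto honapok (gyakori_valaszto honapok)

-- ===== LEMMAS AND PROOFS =====

theorem pv_insTop_length (v : Int) (s : List Int) : (pvInsTop v s).length = s.length + 1 := by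
  induction s with
  | nil => rfl
  | cons h t ih => by_cases hv : v ≤ h <;> simp [pvInsTop, hv, ih]

theorem pv_insTop_perm (v : Int) (s : List Int) : (pvInsTop v s).Perm (v :: s) := by
  induction s with
  | nil => simp [pvInsTop]
  | cons h t ih =>
    by_cases hv : v ≤ h
    · simpa [pvInsTop, hv] using ((ih.cons h).trans (List.Perm.swap v h t))
    · simp [pvInsTop, hv]

theorem pv_insTop_pairwise (v : Int) (s : List Int)
    (hs : s.Pairwise (fun a b => b ≤ a)) : (pvInsTop v s).Pairwise (fun a b => b ≤ a) := by
  induction s with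
  | nil => simp [pvInsTop]
  | cons h t ih =>
    rcases List.pairwise_cons.mp hs with ⟨hh, ht⟩
    by_cases hv : v ≤ h
    · have hmem : ∀ x ∈ pvInsTop v t, x ≤ h := by
        intro x hx
        rcases List.mem_cons.mp ((pv_insTop_perm v t).mem_iff.mp hx) with rfl | hx
        · exact hv
        · exact hh x hx
      simp only [pvInsTop, if_pos hv]
      exact List.pairwise_cons.mpr ⟨hmem, ih ht⟩
    · have hle : h ≤ v := le_of_not_ge hv
      simp only [pvInsTop, if_neg hv]
      refine List.pairwise_cons.mpr ⟨?_, hs⟩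
      intro x hx
      rcases List.mem_cons.mp hx with rfl | hx
      · exact hle
      · exact le_trans (hh x hx) hle

-- truncating to n commutes with bounded insertion
theorem pv_insTop_take (v : Int) : ∀ (s : List Int) (n : Nat),
    ((pvInsTop v (s.take n)).take n) = ((pvInsTop v s).take n) := by
  intro s
  induction s with
  | nil => intro n; simp
  | cons h t ih =>
    intro n
    cases n with
    | zero => rfl
    | succ m =>
      by_cases hv : v ≤ h
      · simp [pvInsTop, hv, ih m]
      · cases m with
        | zero => simp [pvInsTop, hv]
        | succ k => simp [pvInsTop, hv, List.take_take]

-- the bounded one-pass fold is the 3-prefix of full insertion sort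
theorem pv_fold_take : ∀ (l : List Int) (s : List Int),
    l.foldl (fun top v => let t := pvInsTop v top; if 3 < t.length then t.dropLast else t)
      (s.take 3)
    = (l.foldl (fun s v => pvInsTop v s) s).take 3 := by
  intro l
  induction l with
  | nil => intro s; rfl
  | cons v l ih =>
    intro s
    have hstep : (let t := pvInsTop v (s.take 3); if 3 < t.length then t.dropLast else t)
        = (pvInsTop v s).take 3 := by
      have hlen : (pvInsTop v (s.take 3)).length = (s.take 3).length + 1 :=
        pv_insTop_length v _
      by_cases h3 : 3 < (pvInsTop v (s.take 3)).length
      · have h4 : (pvInsTop v (s.take 3)).length = 4 := by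
          have := List.length_take_le 3 s; omega
        have : (pvInsTop v (s.take 3)).dropLast = (pvInsTop v (s.take 3)).take 3 := by
          rw [List.dropLast_eq_take, h4]
        simp only [h3, if_pos, this]
        rw [pv_insTop_take]
      · have : (pvInsTop v (s.take 3)).take 3 = pvInsTop v (s.take 3) := by
          apply List.take_of_length_le; omega
        simp only [h3, ite_false]
        rw [← this, pv_insTop_take]
    simp only [List.foldl_cons, hstep]
    exact ih (pvInsTop v s)

theorem pv_isort_perm : ∀ (l s : List Int),
    (l.foldl (fun s v => pvInsTop v s) s).Perm (s ++ l) := by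
  intro l
  induction l with
  | nil => simp
  | cons v l ih =>
    intro s
    simp only [List.foldl_cons]
    refine (ih (pvInsTop v s)).trans ?_
    refine (List.Perm.append_right l (pv_insTop_perm v s)).trans ?_
    simpa using (List.perm_middle (a := v) (l₁ := s) (l₂ := l)).symm

theorem pv_isort_pairwise : ∀ (l s : List Int), s.Pairwise (fun a b => b ≤ a) →
    (l.foldl (fun s v => pvInsTop v s) s).Pairwise (fun a b => b ≤ a) := by
  intro l
  induction l with
  | nil => intro s hs; exact hs
  | cons v l ih => intro s hs; exact ih _ (pv_insTop_pairwise v s hs)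

-- a descending list is determined by its multiset
theorem pv_desc_unique (l₁ l₂ : List Int) (hp : l₁.Perm l₂)
    (h₁ : l₁.Pairwise (fun a b => b ≤ a)) (h₂ : l₂.Pairwise (fun a b => b ≤ a)) :
    l₁ = l₂ := by
  have : l₁.reverse = l₂.reverse := by
    refine PySem.List.eq_of_perm_of_pairwise_le_of_injective (fun x => x)
      (fun a b h => h) ((l₁.reverse_perm).trans (hp.trans (l₂.reverse_perm).symm)) ?_ ?_
    · simpa [List.pairwise_reverse] using h₁
    · simpa [List.pairwise_reverse] using h₂
  simpa using congrArg List.reverse this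

-- inserting the same key/value twice equals inserting it once
theorem pv_insert_insert (d : PySem.Dict String Int) (k : String) (v : Int) :
    (d.insert k v).insert k v = d.insert k v := by
  apply PySem.Dict.ext
  rw [PySem.Dict.items_insert (d.insert k v) k v, if_pos (PySem.Dict.contains_insert_self d k v)]
  rw [PySem.Dict.items_insert d k v]
  by_cases hc : d.contains k = true
  · rw [if_pos hc, List.map_map]
    refine List.map_congr_left (fun p _ => ?_)
    by_cases hp : p.1 = k
    · simp [Function.comp, hp]
    · simp [Function.comp, hp]
  · rw [if_neg hc, List.map_append]
    have hid : List.map (fun p => if (p.1 == k) = true then (k, v) else p) d.items = d.items := by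
      have hmc : List.map (fun p => if (p.1 == k) = true then (k, v) else p) d.items
          = List.map id d.items := by
        refine List.map_congr_left (fun p hp => ?_)
        have hk : p.1 ≠ k := fun h =>
          hc ((PySem.Dict.contains_iff_mem_keys d k).mpr (h ▸ List.mem_map_of_mem hp))
        simp [hk]
      simpa using hmc
    rw [hid]
    simp

-- the inner range(3) loop collapses to one conditional insert
theorem pv_inner3 (d : PySem.Dict String Int) (k : String) (v x0 x1 x2 : Int) :
    (if v == x2 then
        (if v == x1 then (if v == x0 then d.insert k x0 else d).insert k x1
         else (if v == x0 then d.insert k x0 else d)).insert k x2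
      else
        (if v == x1 then (if v == x0 then d.insert k x0 else d).insert k x1
         else (if v == x0 then d.insert k x0 else d)))
    = if v = x0 ∨ v = x1 ∨ v = x2 then d.insert k v else d := by
  by_cases h0 : v = x0
  · subst h0
    by_cases h1 : v = x1
    · subst h1
      by_cases h2 : v = x2
      · subst h2; simp [pv_insert_insert]
      · simp [h2, pv_insert_insert]
    · by_cases h2 : v = x2
      · subst h2; simp [h1, pv_insert_insert]
      · simp [h1, h2]
  · by_cases h1 : v = x1
    · subst h1
      by_cases h2 : v = x2
      · subst h2; simp [h0, pv_insert_insert]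
      · simp [h0, h2]
    · by_cases h2 : v = x2
      · subst h2; simp [h0, h1]
      · simp [h0, h1, h2]

-- a conditional-insert loop over fresh distinct keys accumulates a filter
theorem pv_outer (P : (String × Int) → Bool) :
    ∀ (l : List (String × Int)) (d : PySem.Dict String Int),
      (∀ kv ∈ l, d.contains kv.1 = false) → (l.map Prod.fst).Nodup →
      (l.foldl (fun d kv => if P kv then d.insert kv.1 kv.2 else d) d).items
        = d.items ++ l.filter P := by
  intro l
  induction l with
  | nil => intro d _ _; simp
  | cons kv t ih =>
    intro d hfresh hnd
    have hkv : d.contains kv.1 = false := hfresh kv (List.mem_cons_self ..)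
    have hnd' : (t.map Prod.fst).Nodup := by simpa using hnd.of_cons
    have hne : ∀ p ∈ t, p.1 ≠ kv.1 := by
      intro p hp h
      simp only [List.map_cons, List.nodup_cons] at hnd
      exact hnd.1 (h ▸ List.mem_map_of_mem hp)
    by_cases hP : P kv = true
    · have hfresh' : ∀ p ∈ t, (d.insert kv.1 kv.2).contains p.1 = false := by
        intro p hp
        rw [PySem.Dict.contains_insert]
        simp [hne p hp, hfresh p (List.mem_cons_of_mem _ hp)]
      simp only [List.foldl_cons, if_pos hP]
      rw [ih (d.insert kv.1 kv.2) hfresh' hnd',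
          PySem.Dict.items_insert_of_not_contains d kv.2 hkv]
      simp [hP]
    · simp only [List.foldl_cons, if_neg hP]
      rw [ih d (fun p hp => hfresh p (List.mem_cons_of_mem _ hp)) hnd']
      simp [hP]

-- membership in the top three of a descending list is comparison with the third element
theorem pv_top3 (vals : List Int) (hp : vals.Pairwise (fun a b => b ≤ a))
    (h3 : 3 ≤ vals.length) (v : Int) (hv : v ∈ vals) :
    (v = vals[0] ∨ v = vals[1] ∨ v = vals[2]) ↔ vals[2] ≤ v := by
  have hmono := List.pairwise_iff_getElem.mp hp
  constructor
  · rintro (h | h | h) <;> subst h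
    · exact hmono 0 2 (by omega) (by omega) (by omega)
    · exact hmono 1 2 (by omega) (by omega) (by omega)
    · exact le_refl _
  · intro hle
    obtain ⟨i, hi, rfl⟩ := List.mem_iff_getElem.mp hv
    match i, hi with
    | 0, _ => exact Or.inl rfl
    | 1, _ => exact Or.inr (Or.inl rfl)
    | 2, _ => exact Or.inr (Or.inr rfl)
    | (n+3), hi =>
      have := hmono 2 (n+3) (by omega) hi (by omega)
      exact Or.inr (Or.inr (by omega))

-- ===== VERDICT (by name: the statement is the Claim_ definition above) =====
theorem gyakori_valaszto_spec : Claim_equal_gyakori_valaszto := by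
  intro honapok _ hpre
  obtain ⟨hnd, hlen⟩ := hpre
  unfold Spec_gyakori_valaszto gyakori_valaszto gyakori_valaszto_alt
  rcases hlen with rfl | hlen
  · rfl
  · simp only []
    set values := (PySem.Dict.mk honapok).values with hvaldef
    set vals := PySem.List.sorted values (fun v => v) true with hvals
    have hvallen : values.length = honapok.length := by
      simp [hvaldef, PySem.Dict.values]
    have hvlen : vals.length = honapok.length := by
      rw [hvals, PySem.List.length_sorted]; exact hvallen
    have h3 : 3 ≤ vals.length := by omega
    -- B's one-pass top list is the 3-prefix of vals
    have htop : values.foldl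
        (fun top v => let t := pvInsTop v top; if 3 < t.length then t.dropLast else t) []
        = vals.take 3 := by
      have h1 : values.foldl
          (fun top v => let t := pvInsTop v top; if 3 < t.length then t.dropLast else t)
          (([] : List Int).take 3)
          = (values.foldl (fun s v => pvInsTop v s) []).take 3 := pv_fold_take values []
      have hperm : (values.foldl (fun s v => pvInsTop v s) []).Perm values := by
        simpa using pv_isort_perm values []
      have heq : values.foldl (fun s v => pvInsTop v s) [] = vals := by
        refine pv_desc_unique _ _ (hperm.trans (PySem.List.sorted_perm values _ _).symm)
          (pv_isort_pairwise values [] (by simp)) ?_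
        simpa using PySem.List.sorted_pairwise_rev values (fun v : Int => v)
      simpa [heq] using h1
    have htoplen : (vals.take 3).length = 3 := by simp; omega
    have hnotlt : ¬ (vals.take 3).length < 3 := by omega
    have hget : ∀ (j : ℕ) (hj : j < vals.length),
        PySem.List.pyGet? vals (j : Int) = some vals[j] := by
      intro j hj
      simp [PySem.List.pyGet?, PySem.List.pyIdx?, hj]
    have h0 : PySem.List.pyGet? vals (0 : Int) = some (vals[0]'(by omega)) := by
      simpa using hget 0 (by omega)
    have h1 : PySem.List.pyGet? vals (1 : Int) = some (vals[1]'(by omega)) := by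
      simpa using hget 1 (by omega)
    have h2 : PySem.List.pyGet? vals (2 : Int) = some (vals[2]'(by omega)) := by
      simpa using hget 2 (by omega)
    have hlook : ∀ kv ∈ honapok, (PySem.Dict.mk honapok).get? kv.1 = some kv.2 := by
      intro kv hkv
      exact PySem.Dict.get?_of_mem_items (PySem.Dict.mk honapok) hkv hnd
    -- A's fold equals a conditional-insert fold with the top-3 membership predicate
    have hA : honapok.foldl (fun (d : PySem.Dict String Int) i =>
        (PySem.List.pyRange 0 3 1).foldl (fun d' j =>
          match PySem.List.pyGet? vals j, (PySem.Dict.mk honapok).get? i.1 with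
          | some x, some v => if v == x then d'.insert i.1 x else d'
          | _, _ => d') d) PySem.Dict.empty
      = honapok.foldl (fun (d : PySem.Dict String Int) kv =>
          if decide (kv.2 = vals[0] ∨ kv.2 = vals[1] ∨ kv.2 = vals[2])
          then d.insert kv.1 kv.2 else d) PySem.Dict.empty := by
      refine PySem.List.foldl_congr_mem honapok _ _ _ (fun d kv hkv => ?_)
      have : PySem.List.pyRange 0 3 1 = [(0 : Int), 1, 2] := rfl
      rw [this]
      simp only [List.foldl_cons, List.foldl_nil, h0, h1, h2, hlook kv hkv]
      rw [pv_inner3 d kv.1 kv.2 vals[0] vals[1] vals[2]]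
      by_cases h : kv.2 = vals[0] ∨ kv.2 = vals[1] ∨ kv.2 = vals[2] <;> simp [h]
    rw [hA, pv_outer _ honapok PySem.Dict.empty
          (fun kv _ => PySem.Dict.contains_empty kv.1) hnd]
    have hempty : (PySem.Dict.empty : PySem.Dict String Int).items = [] := rfl
    rw [hempty, List.nil_append, htop]
    rw [if_neg hnotlt]
    -- the two filters agree on members of honapok
    refine (List.filter_congr (fun kv hkv => ?_)).symm
    have hmem : kv.2 ∈ vals := by
      rw [hvals, PySem.List.mem_sorted]
      exact List.mem_map_of_mem hkv
    have hpair : vals.Pairwise (fun a b => b ≤ a) := by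
      simpa [hvals] using PySem.List.sorted_pairwise_rev values (fun v : Int => v)
    have hiff := pv_top3 vals hpair h3 kv.2 hmem
    have hgd : (vals.take 3).getD 2 0 = vals[2]'(by omega) := by
      rw [List.getD_eq_getElem (vals.take 3) 0 (by omega)]
      simp [List.getElem_take]
    rw [hgd]
    first
      | exact decide_eq_decide.mpr hiff
      | exact decide_eq_decide.mpr hiff.symm
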